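-- pv_equiv track=rewrite | github.com/Hemanth21k/TicTacToe | GameAlgos.py | utilcheck
-- ===== SOURCE A (Python) =====
-- def utilcheck(arr,winK):
--     x=arr[0]
--     tempx=0
--     tempy=0
--     for i in range(len(arr)-winK+1):
--         x=arr[i]
--         for j in range(i,i+winK):
--             if arr[j] == x:
--                 if arr[j] == 'X':
--                     tempx=tempx+1
--                     if tempx == winK:
--                         return -1
--                 elif arr[j] == 'O':
--                     tempy=tempy+1
--                     if tempy == winK:
--                         return 1
--             else:
--                 tempx = 0
--                 tempy = 0
--     return 0
-- ===== SOURCE B (Python) =====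
-- def utilcheck(arr, winK):
--     # single linear pass: track previous symbol and current run length,
--     # return as soon as a run of winK 'X's (-1) or 'O's (1) completes
--     prev = None
--     run = 0
--     for c in arr:
--         run = run + 1 if c == prev else 1
--         prev = c
--         if run == winK and (c == 'X' or c == 'O'):
--             return -1 if c == 'X' else 1
--     return 0
-- ===== Notes on version B (the rewrite author's own statement) =====
-- stated objective: faster
-- what changed: Replaced A's re-scan of every length-winK window (carrying window-head-relative counters across windows) with a single linear pass that tracks the current symbol's run length and returns the moment a run reaches winK.
import Mathlib
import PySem

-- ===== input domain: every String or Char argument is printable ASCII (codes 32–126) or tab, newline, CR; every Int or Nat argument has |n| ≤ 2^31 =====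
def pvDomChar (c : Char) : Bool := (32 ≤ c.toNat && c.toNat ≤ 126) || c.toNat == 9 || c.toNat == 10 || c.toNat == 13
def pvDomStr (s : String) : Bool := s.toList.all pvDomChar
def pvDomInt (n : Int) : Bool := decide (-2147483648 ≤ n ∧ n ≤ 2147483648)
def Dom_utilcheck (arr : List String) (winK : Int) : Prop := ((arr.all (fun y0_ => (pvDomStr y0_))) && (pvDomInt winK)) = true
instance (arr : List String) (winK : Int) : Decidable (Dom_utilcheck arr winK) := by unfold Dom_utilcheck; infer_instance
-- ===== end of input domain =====

-- B replaces A's window-by-window rescan with one linear pass tracking the current run length (asymptotically faster).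

-- ===== PORT A =====
-- inner loop 'for j in range(i, i+winK)': carries (tempx, tempy); Sum.inl = early return, Sum.inr = loop fell through.
-- arr[j] is ported as (pyGet? …).getD "" : inside Pre_ every visited index is in range (Python's IndexError cases are excluded by Pre_).
def utilcheckInnerA (arr : List String) (x : String) (winK : Int) : List Int → Int → Int → Sum Int (Int × Int)
  | [], tempx, tempy => Sum.inr (tempx, tempy)
  | j :: js, tempx, tempy =>
    let aj := (PySem.List.pyGet? arr j).getD ""
    if aj = x then
      if aj = "X" then
        if tempx + 1 = winK then Sum.inl (-1)
        else utilcheckInnerA arr x winK js (tempx + 1) tempy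
      else if aj = "O" then
        if tempy + 1 = winK then Sum.inl 1
        else utilcheckInnerA arr x winK js tempx (tempy + 1)
      else utilcheckInnerA arr x winK js tempx tempy
    else utilcheckInnerA arr x winK js 0 0

-- outer loop 'for i in range(len(arr)-winK+1)': x = arr[i], then the inner loop; falls off the end → return 0
def utilcheckOuterA (arr : List String) (winK : Int) : List Int → Int → Int → Int
  | [], _, _ => 0
  | i :: is, tempx, tempy =>
    let x := (PySem.List.pyGet? arr i).getD ""
    match utilcheckInnerA arr x winK (PySem.List.pyRange i (i + winK) 1) tempx tempy with
    | Sum.inl r => r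
    | Sum.inr (tx, ty) => utilcheckOuterA arr winK is tx ty

-- 'x = arr[0]' only raises on empty arr (excluded by Pre_); its value is dead (overwritten before use), so it is not modelled.
def utilcheck (arr : List String) (winK : Int) : Int :=
  utilcheckOuterA arr winK (PySem.List.pyRange 0 ((arr.length : Int) - winK + 1) 1) 0 0

-- ===== PORT B =====
def utilcheckAltLoop (winK : Int) : List String → Option String → Int → Int
  | [], _, _ => 0
  | c :: rest, prev, run =>
    let run' := if some c = prev then run + 1 else 1
    if run' = winK ∧ (c = "X" ∨ c = "O") then (if c = "X" then -1 else 1)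
    else utilcheckAltLoop winK rest (some c) run'

def utilcheck_alt (arr : List String) (winK : Int) : Int :=
  utilcheckAltLoop winK arr none 0

-- ===== PRECONDITION & SPEC =====
-- Pre_ excludes exactly the inputs on which Python A raises IndexError: empty arr (arr[0]) and
-- winK ≤ 0 (the outer loop then evaluates arr[i] for i ≥ len(arr)).
def Pre_utilcheck (arr : List String) (winK : Int) : Prop := arr ≠ [] ∧ 1 ≤ winK
instance (arr : List String) (winK : Int) : Decidable (Pre_utilcheck arr winK) := by unfold Pre_utilcheck; infer_instance
def pvWitness_utilcheck : List String × Int := (["X", "O", "X"], 2)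

def Spec_utilcheck (arr : List String) (winK : Int) (out : Int) : Prop := out = utilcheck_alt arr winK
instance (arr : List String) (winK : Int) (out : Int) : Decidable (Spec_utilcheck arr winK out) := by unfold Spec_utilcheck; infer_instance

-- ===== CLAIM (what is proved, stated in full; the proofs are below) =====
def Claim_equal_utilcheck : Prop := ∀ (arr : List String) (winK : Int), Dom_utilcheck arr winK → Pre_utilcheck arr winK → Spec_utilcheck arr winK (utilcheck arr winK)

-- ===== LEMMAS AND PROOFS =====

-- common specification: scan window starts left to right, first all-"X" window → -1, first all-"O" window → 1, none → 0
def winScan (k : Nat) : List String → Int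
  | [] => 0
  | c :: rest =>
    if k ≤ (c :: rest).length then
      if (List.take k (c :: rest)).all (· = "X") then -1
      else if (List.take k (c :: rest)).all (· = "O") then 1
      else winScan k rest
    else 0

-- length of the maximal all-x prefix / suffix of a list
def preRun (x : String) : List String → Nat
  | [] => 0
  | c :: l => if c = x then preRun x l + 1 else 0

def sufRun (x : String) : List String → Nat
  | [] => 0
  | c :: l => if c = x ∧ l.all (· = x) then l.length + 1 else sufRun x l

-- value-level mirrors of A's loops (indices replaced by the window contents)
def innerW (x : String) (winK : Int) : List String → Int → Int → Sum Int (Int × Int)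
  | [], tx, ty => Sum.inr (tx, ty)
  | w :: ws, tx, ty =>
    if w = x then
      if w = "X" then
        if tx + 1 = winK then Sum.inl (-1) else innerW x winK ws (tx + 1) ty
      else if w = "O" then
        if ty + 1 = winK then Sum.inl 1 else innerW x winK ws tx (ty + 1)
      else innerW x winK ws tx ty
    else innerW x winK ws 0 0

def outerW (k : Nat) : List String → Int → Int → Int
  | [], _, _ => 0
  | c :: s', tx, ty =>
    if k ≤ (c :: s').length then
      match innerW c (k : Int) (List.take k (c :: s')) tx ty with
      | Sum.inl r => r
      | Sum.inr (tx', ty') => outerW k s' tx' ty'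
    else 0

theorem winScan_short (k : Nat) (s : List String) (h : s.length < k) : winScan k s = 0 := by
  cases s with
  | nil => rfl
  | cons c rest => unfold winScan; rw [if_neg (by omega)]

theorem winScan_cons (k : Nat) (c : String) (rest : List String) :
    winScan k (c :: rest) =
      if k ≤ (c :: rest).length then
        if (List.take k (c :: rest)).all (· = "X") then -1
        else if (List.take k (c :: rest)).all (· = "O") then 1
        else winScan k rest
      else 0 := by
  conv_lhs => unfold winScan

theorem preRun_le (x : String) (l : List String) : preRun x l ≤ l.length := by
  induction l with
  | nil => simp [preRun]
  | cons c l ih => simp only [preRun]; split <;> simp <;> omega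

theorem preRun_all (x : String) (l : List String) (h : l.length ≤ preRun x l) : l.all (· = x) := by
  induction l with
  | nil => rfl
  | cons c l ih =>
    simp only [preRun] at h
    by_cases hc : c = x
    · rw [if_pos hc] at h
      simp only [List.length_cons] at h
      simp only [List.all_cons, Bool.and_eq_true, decide_eq_true_eq]
      exact ⟨hc, ih (by omega)⟩
    · rw [if_neg hc] at h
      simp at h

theorem all_preRun (x : String) (l : List String) (h : l.all (· = x)) : preRun x l = l.length := by
  induction l with
  | nil => rfl
  | cons c l ih => simp_all [preRun]

theorem sufRun_le (x : String) (l : List String) : sufRun x l ≤ l.length := by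
  induction l with
  | nil => simp [sufRun]
  | cons c l ih => simp only [sufRun]; split <;> simp <;> omega

theorem all_sufRun (x : String) (l : List String) (h : l.all (· = x)) : sufRun x l = l.length := by
  cases l with
  | nil => rfl
  | cons c l =>
    simp only [List.all_cons, Bool.and_eq_true, decide_eq_true_eq] at h
    simp [sufRun, h.1, h.2]

theorem sufRun_all (x : String) (l : List String) (h : l.length ≤ sufRun x l) : l.all (· = x) := by
  induction l with
  | nil => rfl
  | cons c l ih =>
    simp only [sufRun] at h
    by_cases hc : c = x ∧ l.all (· = x)
    · simp only [List.all_cons, Bool.and_eq_true, decide_eq_true_eq]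
      exact ⟨hc.1, hc.2⟩
    · rw [if_neg hc] at h
      have := sufRun_le x l
      simp only [List.length_cons] at h
      omega

theorem sufRun_zero_of_ne (x c : String) (l : List String) (hall : l.all (· = c)) (hne : c ≠ x) :
    sufRun x l = 0 := by
  induction l with
  | nil => rfl
  | cons a l ih =>
    simp only [List.all_cons, Bool.and_eq_true, decide_eq_true_eq] at hall
    obtain ⟨rfl, h2⟩ := hall
    simp only [sufRun]
    rw [if_neg]
    · exact ih h2
    · rintro ⟨rfl, -⟩; exact hne rfl

-- maximality of the suffix run of a prefix clashes with a long all-x prefix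
theorem clash (x : String) (l : List String) (j : Nat) (hj : j ≤ l.length)
    (h1 : j - sufRun x (l.take j) ≤ preRun x l) (h2 : sufRun x (l.take j) < j) : False := by
  induction l generalizing j with
  | nil => simp at hj; omega
  | cons c l ih =>
    cases j with
    | zero => simp [sufRun] at h2
    | succ j =>
      simp only [List.take_succ_cons] at h1 h2
      simp only [sufRun] at h1 h2
      by_cases hc : c = x
      · subst hc
        have hpr : preRun c (c :: l) = preRun c l + 1 := by simp [preRun]
        rw [hpr] at h1
        by_cases hall : (l.take j).all (· = c)
        · rw [if_pos ⟨rfl, hall⟩] at h2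
          rw [List.length_take] at h2
          simp at hj; omega
        · rw [if_neg (by rintro ⟨-, h⟩; exact hall h)] at h1 h2
          have hlt : sufRun c (l.take j) < j := by
            have h3 : sufRun c (l.take j) ≤ (l.take j).length := sufRun_le _ _
            rw [List.length_take] at h3
            rcases Nat.lt_or_ge (sufRun c (l.take j)) j with h | h
            · exact h
            · exfalso
              have : (l.take j).length ≤ sufRun c (l.take j) := by
                rw [List.length_take]; omega
              exact hall (sufRun_all _ _ this)
          exact ih j (by simp at hj; omega) (by omega) hlt
      · rw [if_neg (by rintro ⟨h, -⟩; exact hc h)] at h1 h2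
        simp only [preRun, if_neg hc] at h1
        have := sufRun_le x (l.take j)
        omega

-- characterisation of the inner loop with head "X"
theorem innerX (K : Int) (hK : 1 ≤ K) (ws : List String) :
    ∀ tx ty : Int, 0 ≤ tx → tx < K → (ws.length : Int) ≤ K →
    innerW "X" K ws tx ty =
      if K ≤ tx + (preRun "X" ws : Int) then Sum.inl (-1)
      else Sum.inr (if ws.all (· = "X") then tx + ws.length else (sufRun "X" ws : Int),
                    if ws.all (· = "X") then ty else 0) := by
  induction ws with
  | nil =>
    intro tx ty h0 hlt _
    simp only [innerW, preRun, sufRun]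
    rw [if_neg (show ¬ K ≤ tx + ((0 : Nat) : Int) from by push_cast; omega)]
    simp
  | cons w ws ih =>
    intro tx ty h0 hlt hlen
    simp only [List.length_cons] at hlen
    push_cast at hlen
    by_cases hw : w = "X"
    · subst hw
      rw [show innerW "X" K ("X" :: ws) tx ty =
            (if tx + 1 = K then Sum.inl (-1) else innerW "X" K ws (tx + 1) ty) from by
        simp [innerW]]
      rw [show preRun "X" ("X" :: ws) = preRun "X" ws + 1 from by simp [preRun]]
      by_cases hret : tx + 1 = K
      · rw [if_pos hret,
          if_pos (show K ≤ tx + ((preRun "X" ws + 1 : Nat) : Int) from by push_cast; omega)]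
      · rw [if_neg hret, ih (tx + 1) ty (by omega) (by omega) (by omega)]
        by_cases hc : K ≤ tx + 1 + (preRun "X" ws : Int)
        · rw [if_pos hc,
            if_pos (show K ≤ tx + ((preRun "X" ws + 1 : Nat) : Int) from by push_cast at hc ⊢; omega)]
        · rw [if_neg hc,
            if_neg (show ¬ K ≤ tx + ((preRun "X" ws + 1 : Nat) : Int) from by push_cast at hc ⊢; omega)]
          rw [show (("X" :: ws).all (· = "X")) = (ws.all (· = "X")) from by simp]
          by_cases hall : ws.all (· = "X")
          · simp only [hall, if_true]
            simp only [List.length_cons, Sum.inr.injEq, Prod.mk.injEq]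
            exact ⟨by push_cast; ring, by trivial⟩
          · simp only [hall, Bool.false_eq_true, if_false]
            rw [show sufRun "X" ("X" :: ws) = sufRun "X" ws from by
              simp only [sufRun]; rw [if_neg (by rintro ⟨-, h⟩; exact hall h)]]
    · rw [show innerW "X" K (w :: ws) tx ty = innerW "X" K ws 0 0 from by
        simp [innerW, hw]]
      rw [ih 0 0 le_rfl (by omega) (by omega)]
      have hple := preRun_le "X" ws
      rw [if_neg (show ¬ K ≤ 0 + (preRun "X" ws : Int) from by push_cast; omega)]
      rw [show preRun "X" (w :: ws) = 0 from by simp [preRun, hw]]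
      rw [if_neg (show ¬ K ≤ tx + ((0 : Nat) : Int) from by push_cast; omega)]
      have hna : ¬ (((w :: ws).all (· = "X")) = true) := by
        simp only [List.all_cons, Bool.and_eq_true, decide_eq_true_eq]
        rintro ⟨h, -⟩; exact hw h
      simp only [hna, Bool.false_eq_true, if_false]
      rw [show sufRun "X" (w :: ws) = sufRun "X" ws from by
        simp only [sufRun]; rw [if_neg (by rintro ⟨h, -⟩; exact hw h)]]
      by_cases hall : ws.all (· = "X")
      · simp only [hall, if_true]
        rw [all_sufRun _ _ hall]
        simp
      · simp only [hall, Bool.false_eq_true, if_false]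

-- characterisation of the inner loop with head "O" (mirror of innerX)
theorem innerO (K : Int) (hK : 1 ≤ K) (ws : List String) :
    ∀ tx ty : Int, 0 ≤ ty → ty < K → (ws.length : Int) ≤ K →
    innerW "O" K ws tx ty =
      if K ≤ ty + (preRun "O" ws : Int) then Sum.inl 1
      else Sum.inr (if ws.all (· = "O") then tx else 0,
                    if ws.all (· = "O") then ty + ws.length else (sufRun "O" ws : Int)) := by
  induction ws with
  | nil =>
    intro tx ty h0 hlt _
    simp only [innerW, preRun, sufRun]
    rw [if_neg (show ¬ K ≤ ty + ((0 : Nat) : Int) from by push_cast; omega)]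
    simp
  | cons w ws ih =>
    intro tx ty h0 hlt hlen
    simp only [List.length_cons] at hlen
    push_cast at hlen
    by_cases hw : w = "O"
    · subst hw
      rw [show innerW "O" K ("O" :: ws) tx ty =
            (if ty + 1 = K then Sum.inl 1 else innerW "O" K ws tx (ty + 1)) from by
        simp [innerW]]
      rw [show preRun "O" ("O" :: ws) = preRun "O" ws + 1 from by simp [preRun]]
      by_cases hret : ty + 1 = K
      · rw [if_pos hret,
          if_pos (show K ≤ ty + ((preRun "O" ws + 1 : Nat) : Int) from by push_cast; omega)]
      · rw [if_neg hret, ih tx (ty + 1) (by omega) (by omega) (by omega)]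
        by_cases hc : K ≤ ty + 1 + (preRun "O" ws : Int)
        · rw [if_pos hc,
            if_pos (show K ≤ ty + ((preRun "O" ws + 1 : Nat) : Int) from by push_cast at hc ⊢; omega)]
        · rw [if_neg hc,
            if_neg (show ¬ K ≤ ty + ((preRun "O" ws + 1 : Nat) : Int) from by push_cast at hc ⊢; omega)]
          rw [show (("O" :: ws).all (· = "O")) = (ws.all (· = "O")) from by simp]
          by_cases hall : ws.all (· = "O")
          · simp only [hall, if_true]
            simp only [List.length_cons, Sum.inr.injEq, Prod.mk.injEq]
            exact ⟨by trivial, by push_cast; ring⟩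
          · simp only [hall, Bool.false_eq_true, if_false]
            rw [show sufRun "O" ("O" :: ws) = sufRun "O" ws from by
              simp only [sufRun]; rw [if_neg (by rintro ⟨-, h⟩; exact hall h)]]
    · rw [show innerW "O" K (w :: ws) tx ty = innerW "O" K ws 0 0 from by
        simp [innerW, hw]]
      rw [ih 0 0 le_rfl (by omega) (by omega)]
      have hple := preRun_le "O" ws
      rw [if_neg (show ¬ K ≤ 0 + (preRun "O" ws : Int) from by push_cast; omega)]
      rw [show preRun "O" (w :: ws) = 0 from by simp [preRun, hw]]
      rw [if_neg (show ¬ K ≤ ty + ((0 : Nat) : Int) from by push_cast; omega)]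
      have hna : ¬ (((w :: ws).all (· = "O")) = true) := by
        simp only [List.all_cons, Bool.and_eq_true, decide_eq_true_eq]
        rintro ⟨h, -⟩; exact hw h
      simp only [hna, Bool.false_eq_true, if_false]
      rw [show sufRun "O" (w :: ws) = sufRun "O" ws from by
        simp only [sufRun]; rw [if_neg (by rintro ⟨h, -⟩; exact hw h)]]
      by_cases hall : ws.all (· = "O")
      · simp only [hall, if_true]
        rw [all_sufRun _ _ hall]
        simp
      · simp only [hall, Bool.false_eq_true, if_false]

-- characterisation of the inner loop with a head that is neither "X" nor "O"
theorem innerC (K : Int) (x : String) (hx : x ≠ "X") (ho : x ≠ "O") (ws : List String) :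
    ∀ tx ty : Int, innerW x K ws tx ty =
      Sum.inr (if ws.all (· = x) then (tx, ty) else (0, 0)) := by
  induction ws with
  | nil => intro tx ty; simp [innerW]
  | cons w ws ih =>
    intro tx ty
    simp only [innerW]
    by_cases hw : w = x
    · subst hw
      rw [if_pos rfl, if_neg hx, if_neg ho, ih]
      by_cases hall : ws.all (· = w)
      · simp [hall]
      · simp only [List.all_cons, Bool.and_eq_true, decide_eq_true_eq]
        rw [if_neg hall, if_neg (by rintro ⟨-, h⟩; exact hall h)]
    · rw [if_neg hw, ih]
      have : ¬ ((w :: ws).all (· = x) = true) := by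
        simp only [List.all_cons, Bool.and_eq_true, decide_eq_true_eq]
        rintro ⟨h, -⟩; exact hw h
      rw [if_neg this]
      simp

-- the invariant carried by A's outer loop
def InvR (x : String) (k : Nat) (s : List String) (t : Int) : Prop :=
  t = 0 ∨ (1 ≤ t ∧ t + 2 ≤ (k : Int) ∧ t = (sufRun x (s.take (k - 1)) : Int))

theorem outerW_eq_winScan (k : Nat) (hk : 1 ≤ k) (s : List String) :
    ∀ tx ty : Int, InvR "X" k s tx → InvR "O" k s ty → outerW k s tx ty = winScan k s := by
  induction s with
  | nil => intro tx ty _ _; rfl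
  | cons c s' ih =>
    intro tx ty hIX hIO
    have h0x : 0 ≤ tx := by rcases hIX with h | h <;> omega
    have h0y : 0 ≤ ty := by rcases hIO with h | h <;> omega
    have hltx : tx < (k : Int) := by rcases hIX with h | h <;> push_cast <;> omega
    have hlty : ty < (k : Int) := by rcases hIO with h | h <;> push_cast <;> omega
    by_cases hlen : k ≤ (c :: s').length
    case neg =>
      unfold outerW winScan
      rw [if_neg hlen, if_neg hlen]
    case pos =>
    have hwlen : (List.take k (c :: s')).length = k := by
      rw [List.length_take]; omega
    have hs'len : k - 1 ≤ s'.length := by simp at hlen; omega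
    unfold outerW winScan
    rw [if_pos hlen, if_pos hlen]
    have htk : List.take k (c :: s') = c :: List.take (k - 1) s' := by
      conv_lhs => rw [show k = (k - 1) + 1 from by omega]
      rw [List.take_succ_cons]
    by_cases hcX : c = "X"
    · subst hcX
      rw [innerX (k : Int) (by exact_mod_cast hk) _ tx ty h0x hltx (by rw [hwlen])]
      by_cases hret : (k : Int) ≤ tx + (preRun "X" (List.take k (("X" : String) :: s')) : Int)
      · rw [if_pos hret]
        -- A returns -1; show the window is indeed all "X"
        have hall : (List.take k (("X" : String) :: s')).all (· = "X") := by
          rcases hIX with rfl | ⟨h1, h2, h3⟩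
          · apply preRun_all
            rw [hwlen]
            have := preRun_le "X" (List.take k (("X" : String) :: s'))
            omega
          · exfalso
            have hsub : List.take (k - 1) (("X" : String) :: s') =
                List.take (k - 1) (List.take k (("X" : String) :: s')) := by
              rw [List.take_take]
              congr 1
              omega
            rw [hsub] at h3
            refine clash "X" (List.take k (("X" : String) :: s')) (k - 1) (by omega) ?_ ?_
            · have : (k : Int) - 1 - (sufRun "X" ((List.take k (("X" : String) :: s')).take (k - 1)) : Int)
                  ≤ (preRun "X" (List.take k (("X" : String) :: s')) : Int) := by omega
              have hkk : 1 ≤ k := hk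
              push_cast at this ⊢
              omega
            · omega
        rw [if_pos hall]
      · rw [if_neg hret]
        have hnall : ¬ ((List.take k (("X" : String) :: s')).all (· = "X") = true) := by
          intro hall
          have := all_preRun "X" _ hall
          rw [hwlen] at this
          rw [this] at hret
          push_cast at hret
          omega
        rw [if_neg hnall]
        have hnallO : ¬ ((List.take k (("X" : String) :: s')).all (· = "O") = true) := by
          rw [htk]
          simp only [List.all_cons, Bool.and_eq_true, decide_eq_true_eq]
          rintro ⟨h, -⟩; exact absurd h (by decide)
        rw [if_neg hnallO]
        rw [if_neg hnall, if_neg hnall]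
        -- new tx' = sufRun of the window; establish the invariant for s'
        have hnall' : ¬ ((List.take (k - 1) s').all (· = "X") = true) := by
          intro h
          apply hnall
          rw [htk]
          simp [h]
        have hsw : sufRun "X" (List.take k (("X" : String) :: s')) = sufRun "X" (List.take (k - 1) s') := by
          rw [htk]
          simp only [sufRun]
          rw [if_neg (by rintro ⟨-, h⟩; exact hnall' h)]
        apply ih
        · by_cases hz : sufRun "X" (List.take (k - 1) s') = 0
          · left; rw [hsw, hz]; rfl
          · right
            refine ⟨by rw [hsw]; exact_mod_cast Nat.one_le_iff_ne_zero.mpr hz, ?_, by rw [hsw]⟩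
            have hle : sufRun "X" (List.take (k - 1) s') ≤ (List.take (k - 1) s').length :=
              sufRun_le _ _
            have hlt : sufRun "X" (List.take (k - 1) s') < (List.take (k - 1) s').length := by
              rcases Nat.lt_or_ge (sufRun "X" (List.take (k - 1) s')) ((List.take (k - 1) s').length) with h | h
              · exact h
              · exact absurd (sufRun_all _ _ h) hnall'
            rw [List.length_take] at hlt
            rw [hsw]
            push_cast
            omega
        · left; rfl
    · by_cases hcO : c = "O"
      · subst hcO
        rw [innerO (k : Int) (by exact_mod_cast hk) _ tx ty h0y hlty (by rw [hwlen])]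
        by_cases hret : (k : Int) ≤ ty + (preRun "O" (List.take k (("O" : String) :: s')) : Int)
        · rw [if_pos hret]
          have hall : (List.take k (("O" : String) :: s')).all (· = "O") := by
            rcases hIO with rfl | ⟨h1, h2, h3⟩
            · apply preRun_all
              rw [hwlen]
              have := preRun_le "O" (List.take k (("O" : String) :: s'))
              omega
            · exfalso
              have hsub : List.take (k - 1) (("O" : String) :: s') =
                  List.take (k - 1) (List.take k (("O" : String) :: s')) := by
                rw [List.take_take]
                congr 1
                omega
              rw [hsub] at h3
              refine clash "O" (List.take k (("O" : String) :: s')) (k - 1) (by omega) ?_ ?_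
              · have hkk : 1 ≤ k := hk
                push_cast at h3 hret ⊢
                omega
              · omega
          have hnallX : ¬ ((List.take k (("O" : String) :: s')).all (· = "X") = true) := by
            rw [htk]
            simp only [List.all_cons, Bool.and_eq_true, decide_eq_true_eq]
            rintro ⟨h, -⟩; exact absurd h (by decide)
          rw [if_neg hnallX, if_pos hall]
        · rw [if_neg hret]
          have hnall : ¬ ((List.take k (("O" : String) :: s')).all (· = "O") = true) := by
            intro hall
            have := all_preRun "O" _ hall
            rw [hwlen] at this
            rw [this] at hret
            push_cast at hret
            omega
          have hnallX : ¬ ((List.take k (("O" : String) :: s')).all (· = "X") = true) := by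
            rw [htk]
            simp only [List.all_cons, Bool.and_eq_true, decide_eq_true_eq]
            rintro ⟨h, -⟩; exact absurd h (by decide)
          rw [if_neg hnallX, if_neg hnall]
          rw [if_neg hnall, if_neg hnall]
          have hnall' : ¬ ((List.take (k - 1) s').all (· = "O") = true) := by
            intro h
            apply hnall
            rw [htk]
            simp [h]
          have hsw : sufRun "O" (List.take k (("O" : String) :: s')) = sufRun "O" (List.take (k - 1) s') := by
            rw [htk]
            simp only [sufRun]
            rw [if_neg (by rintro ⟨-, h⟩; exact hnall' h)]
          apply ih
          · left; rfl
          · by_cases hz : sufRun "O" (List.take (k - 1) s') = 0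
            · left; rw [hsw, hz]; rfl
            · right
              refine ⟨by rw [hsw]; exact_mod_cast Nat.one_le_iff_ne_zero.mpr hz, ?_, by rw [hsw]⟩
              have hlt : sufRun "O" (List.take (k - 1) s') < (List.take (k - 1) s').length := by
                rcases Nat.lt_or_ge (sufRun "O" (List.take (k - 1) s')) ((List.take (k - 1) s').length) with h | h
                · exact h
                · exact absurd (sufRun_all _ _ h) hnall'
              rw [List.length_take] at hlt
              rw [hsw]
              push_cast
              omega
      · -- head neither "X" nor "O": counters pass through as (0,0)
        rw [innerC (k : Int) c hcX hcO]
        have hnallX : ¬ ((List.take k (c :: s')).all (· = "X") = true) := by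
          rw [htk]
          simp only [List.all_cons, Bool.and_eq_true, decide_eq_true_eq]
          rintro ⟨h, -⟩; exact hcX h
        have hnallO : ¬ ((List.take k (c :: s')).all (· = "O") = true) := by
          rw [htk]
          simp only [List.all_cons, Bool.and_eq_true, decide_eq_true_eq]
          rintro ⟨h, -⟩; exact hcO h
        rw [if_neg hnallX, if_neg hnallO]
        by_cases hall : (List.take k (c :: s')).all (· = c)
        · -- pass-through window: the invariant forces tx = ty = 0
          have htx0 : tx = 0 := by
            rcases hIX with h | ⟨h1, h2, h3⟩
            · exact h
            · exfalso
              have hpref : (List.take (k - 1) (c :: s')).all (· = c) := by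
                have : List.take (k - 1) (c :: s') = List.take (k - 1) (List.take k (c :: s')) := by
                  rw [List.take_take]; congr 1; omega
                rw [this]
                exact List.all_eq_true.mpr (fun a ha => List.all_eq_true.mp hall a (List.mem_of_mem_take ha))
              rw [sufRun_zero_of_ne "X" c _ hpref hcX] at h3
              omega
          have hty0 : ty = 0 := by
            rcases hIO with h | ⟨h1, h2, h3⟩
            · exact h
            · exfalso
              have hpref : (List.take (k - 1) (c :: s')).all (· = c) := by
                have : List.take (k - 1) (c :: s') = List.take (k - 1) (List.take k (c :: s')) := by
                  rw [List.take_take]; congr 1; omega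
                rw [this]
                exact List.all_eq_true.mpr (fun a ha => List.all_eq_true.mp hall a (List.mem_of_mem_take ha))
              rw [sufRun_zero_of_ne "O" c _ hpref hcO] at h3
              omega
          rw [if_pos hall, htx0, hty0]
          exact ih 0 0 (Or.inl rfl) (Or.inl rfl)
        · rw [if_neg hall]
          exact ih 0 0 (Or.inl rfl) (Or.inl rfl)

-- ===== bridge: A's index-based loops equal the value-based loops =====

theorem bridge_inner (arr : List String) (x : String) (K : Int) (m : Nat) :
    ∀ (j : Nat) (tx ty : Int), j + m ≤ arr.length →
    utilcheckInnerA arr x K (PySem.List.pyRange (j : Int) ((j : Int) + (m : Int)) 1) tx ty =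
      innerW x K (List.take m (arr.drop j)) tx ty := by
  induction m with
  | zero =>
    intro j tx ty _
    rw [PySem.List.pyRange_one_eq_nil (by omega)]
    simp [utilcheckInnerA, innerW]
  | succ m ih =>
    intro j tx ty hj
    rw [PySem.List.pyRange_one_cons (by push_cast; omega)]
    have hjlt : j < arr.length := by omega
    have hget : (PySem.List.pyGet? arr (j : Int)).getD "" = arr[j] := by
      rw [PySem.List.pyGet?_natCast]
      simp [List.getElem?_eq_getElem hjlt]
    have hdrop : List.take (m + 1) (arr.drop j) = arr[j] :: List.take m (arr.drop (j + 1)) := by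
      rw [List.drop_eq_getElem_cons hjlt, List.take_succ_cons]
    rw [hdrop]
    simp only [utilcheckInnerA, innerW, hget]
    push_cast
    rw [show (j : Int) + ((m : Int) + 1) = ((j + 1 : Nat) : Int) + (m : Int) from by push_cast; ring]
    rw [show (j : Int) + 1 = ((j + 1 : Nat) : Int) from by push_cast; ring]
    by_cases h1 : arr[j] = x
    · rw [if_pos h1, if_pos h1]
      by_cases h2 : arr[j] = "X"
      · rw [if_pos h2, if_pos h2]
        by_cases h3 : tx + 1 = K
        · rw [if_pos h3, if_pos h3]
        · rw [if_neg h3, if_neg h3]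
          exact ih (j + 1) (tx + 1) ty (by omega)
      · rw [if_neg h2, if_neg h2]
        by_cases h4 : arr[j] = "O"
        · rw [if_pos h4, if_pos h4]
          by_cases h5 : ty + 1 = K
          · rw [if_pos h5, if_pos h5]
          · rw [if_neg h5, if_neg h5]
            exact ih (j + 1) tx (ty + 1) (by omega)
        · rw [if_neg h4, if_neg h4]
          exact ih (j + 1) tx ty (by omega)
    · rw [if_neg h1, if_neg h1]
      exact ih (j + 1) 0 0 (by omega)

theorem bridge_outer (arr : List String) (k : Nat) (hk : 1 ≤ k) :
    ∀ (fuel : Nat) (d : Nat) (tx ty : Int), arr.length + 1 - d ≤ fuel →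
    utilcheckOuterA arr (k : Int) (PySem.List.pyRange (d : Int) ((arr.length : Int) - (k : Int) + 1) 1) tx ty =
      outerW k (arr.drop d) tx ty := by
  intro fuel
  induction fuel with
  | zero =>
    intro d tx ty h
    rw [PySem.List.pyRange_one_eq_nil (show (arr.length : Int) - (k : Int) + 1 ≤ (d : Int) from by
      push_cast; omega)]
    rw [List.drop_eq_nil_of_le (by omega)]
    rfl
  | succ fuel ih =>
    intro d tx ty hf
    by_cases hd : (d : Int) < (arr.length : Int) - (k : Int) + 1
    · rw [PySem.List.pyRange_one_cons hd]
      have hdk : d + k ≤ arr.length := by omega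
      have hdlt : d < arr.length := by omega
      have hget : (PySem.List.pyGet? arr (d : Int)).getD "" = arr[d] := by
        rw [PySem.List.pyGet?_natCast]
        simp [List.getElem?_eq_getElem hdlt]
      have hdropd : arr.drop d = arr[d] :: arr.drop (d + 1) := List.drop_eq_getElem_cons hdlt
      simp only [utilcheckOuterA, hget]
      rw [bridge_inner arr arr[d] (k : Int) k d tx ty hdk]
      conv_rhs => rw [hdropd]
      unfold outerW
      rw [if_pos (show k ≤ (arr[d] :: arr.drop (d + 1)).length from by
        simp only [List.length_cons, List.length_drop]; omega)]
      rw [show List.take k (arr[d] :: arr.drop (d + 1)) = List.take k (arr.drop d) from by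
        rw [hdropd]]
      cases hmatch : innerW (arr[d]) (k : Int) (List.take k (arr.drop d)) tx ty with
      | inl r => rfl
      | inr p =>
        obtain ⟨tx', ty'⟩ := p
        rw [show (d : Int) + 1 = ((d + 1 : Nat) : Int) from by push_cast; ring]
        exact ih (d + 1) tx' ty' (by omega)
    · rw [PySem.List.pyRange_one_eq_nil (show (arr.length : Int) - (k : Int) + 1 ≤ (d : Int) from by omega)]
      simp only [utilcheckOuterA]
      cases hdp : arr.drop d with
      | nil => rfl
      | cons c s' =>
        unfold outerW
        rw [if_neg (show ¬ k ≤ (c :: s').length from by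
          have : (arr.drop d).length = arr.length - d := List.length_drop
          rw [hdp] at this
          simp only [List.length_cons] at this ⊢
          omega)]

-- ===== B equals winScan =====

theorem winScan_skip (k : Nat) (hk : 1 ≤ k) (p : String) (r : Nat)
    (hp : (p = "X" ∨ p = "O") → r < k) :
    ∀ rest : List String, (∀ c, rest.head? = some c → c ≠ p) →
    winScan k (List.replicate r p ++ rest) = winScan k rest := by
  induction r with
  | zero => intro rest _; simp
  | succ r ih =>
    intro rest hhead
    rw [List.replicate_succ, List.cons_append, winScan_cons]
    by_cases hlen : k ≤ (p :: (List.replicate r p ++ rest)).length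
    · rw [if_pos hlen]
      have hnall : ∀ y : String, y = "X" ∨ y = "O" →
          ¬ ((List.take k (p :: (List.replicate r p ++ rest))).all (· = y) = true) := by
        intro y hy hall
        have hmem := List.all_eq_true.mp hall
        have hpy : p = y := by
          have : p ∈ List.take k (p :: (List.replicate r p ++ rest)) := by
            rw [show k = (k - 1) + 1 from by omega, List.take_succ_cons]
            exact List.mem_cons_self
          simpa using hmem p this
        have hrk : r + 1 < k := hp (hpy ▸ hy)
        -- rest is nonempty and its head lands inside the window
        simp only [List.length_cons, List.length_append, List.length_replicate] at hlen
        obtain ⟨c0, rest', rfl⟩ : ∃ c0 rest', rest = c0 :: rest' := by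
          cases rest with
          | nil => exfalso; simp at hlen; omega
          | cons a b => exact ⟨a, b, rfl⟩
        have hc0 : c0 ∈ List.take k (p :: (List.replicate r p ++ c0 :: rest')) := by
          rw [show k = (k - 1) + 1 from by omega, List.take_succ_cons]
          refine List.mem_cons_of_mem _ ?_
          rw [List.take_append]
          refine List.mem_append_right _ ?_
          rw [show k - 1 - (List.replicate r p).length = (k - 1 - r - 1) + 1 from by
            simp only [List.length_replicate]; omega, List.take_succ_cons]
          exact List.mem_cons_self
        have : c0 = y := by simpa using hmem c0 hc0
        exact hhead c0 rfl (this.trans hpy.symm)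
      rw [if_neg (hnall "X" (Or.inl rfl)), if_neg (hnall "O" (Or.inr rfl))]
      exact ih (by intro h; have := hp h; omega) rest hhead
    · rw [if_neg hlen]
      have : rest.length < k := by
        simp only [List.length_cons, List.length_append, List.length_replicate] at hlen
        omega
      rw [winScan_short k rest this]

theorem altLoop_eq_winScan (k : Nat) (hk : 1 ≤ k) :
    ∀ (s : List String) (p : String) (r : Nat), 1 ≤ r → ((p = "X" ∨ p = "O") → r < k) →
    utilcheckAltLoop (k : Int) s (some p) (r : Int) = winScan k (List.replicate r p ++ s) := by
  intro s
  induction s with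
  | nil =>
    intro p r hr hp
    rw [winScan_skip k hk p r hp [] (by intro c h; simp at h)]
    rfl
  | cons c s' ih =>
    intro p r hr hp
    by_cases hcp : c = p
    · subst hcp
      rw [show List.replicate r c ++ c :: s' = List.replicate (r + 1) c ++ s' from by
        rw [List.replicate_succ', List.append_assoc]; rfl]
      rw [show utilcheckAltLoop (k : Int) (c :: s') (some c) (r : Int) =
            (if (r : Int) + 1 = (k : Int) ∧ (c = "X" ∨ c = "O") then (if c = "X" then -1 else 1)
             else utilcheckAltLoop (k : Int) s' (some c) ((r : Int) + 1)) from by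
        simp [utilcheckAltLoop]]
      by_cases hret : (r : Int) + 1 = (k : Int) ∧ (c = "X" ∨ c = "O")
      · rw [if_pos hret]
        obtain ⟨hrk, hXO⟩ := hret
        have hrk' : r + 1 = k := by exact_mod_cast hrk
        rw [List.replicate_succ, List.cons_append, winScan_cons]
        have hlen : k ≤ (c :: (List.replicate r c ++ s')).length := by
          simp only [List.length_cons, List.length_append, List.length_replicate]; omega
        rw [if_pos hlen]
        have htake : List.take k (c :: (List.replicate r c ++ s')) = List.replicate k c := by
          rw [← List.cons_append, ← List.replicate_succ]
          rw [List.take_left' (by rw [List.length_replicate]; omega)]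
          rw [hrk']
        rw [htake]
        have hallp : (List.replicate k c).all (· = c) = true := by
          simp [List.all_eq_true, List.mem_replicate]
        rcases hXO with rfl | rfl
        · rw [if_pos hallp]
          decide
        · rw [if_neg (show ¬ ((List.replicate k ("O" : String)).all (· = "X") = true) from by
            intro h
            have := List.all_eq_true.mp h "O" (List.mem_replicate.mpr ⟨by omega, rfl⟩)
            simp at this)]
          rw [if_pos hallp]
          decide
      · rw [if_neg hret]
        have hstep : ((r : Int) + 1) = ((r + 1 : Nat) : Int) := by push_cast; ring
        rw [hstep, ih c (r + 1) (by omega) (by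
          intro hXO
          have h1 : (r : Int) + 1 ≠ (k : Int) := fun h => hret ⟨h, hXO⟩
          have h2 : r < k := hp hXO
          omega)]
    · rw [show utilcheckAltLoop (k : Int) (c :: s') (some p) (r : Int) =
            (if (1 : Int) = (k : Int) ∧ (c = "X" ∨ c = "O") then (if c = "X" then -1 else 1)
             else utilcheckAltLoop (k : Int) s' (some c) 1) from by
        simp [utilcheckAltLoop, hcp]]
      rw [winScan_skip k hk p r hp (c :: s') (by intro a ha; simp only [List.head?_cons, Option.some.injEq] at ha; subst ha; exact hcp)]
      by_cases hret : (1 : Int) = (k : Int) ∧ (c = "X" ∨ c = "O")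
      · rw [if_pos hret]
        obtain ⟨hrk, hXO⟩ := hret
        have hk1 : k = 1 := by omega
        subst hk1
        rw [winScan_cons]
        rw [if_pos (show 1 ≤ (c :: s').length from by simp)]
        simp only [List.take_succ_cons, List.take_zero]
        rcases hXO with rfl | rfl
        · rw [if_pos (show ((["X"] : List String).all (· = "X")) = true from by decide)]
          decide
        · rw [if_neg (show ¬ (((["O"] : List String).all (· = "X")) = true) from by decide),
              if_pos (show ((["O"] : List String).all (· = "O")) = true from by decide)]
          decide
      · rw [if_neg hret]
        have : utilcheckAltLoop (k : Int) s' (some c) 1 =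
            winScan k (List.replicate 1 c ++ s') := by
          rw [show (1 : Int) = ((1 : Nat) : Int) from rfl]
          exact ih c 1 le_rfl (by
            intro hXO
            have h1 : (1 : Int) ≠ (k : Int) := fun h => hret ⟨h.symm ▸ rfl, hXO⟩
            omega)
        rw [this]
        rfl

-- ===== assembling the verdict =====

theorem utilcheck_eq_winScan (arr : List String) (k : Nat) (hk : 1 ≤ k) :
    utilcheck arr (k : Int) = winScan k arr := by
  unfold utilcheck
  have hb := bridge_outer arr k hk (arr.length + 1) 0 0 0 (by omega)
  simp only [Nat.cast_zero] at hb
  rw [hb, List.drop_zero]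
  exact outerW_eq_winScan k hk arr 0 0 (Or.inl rfl) (Or.inl rfl)

theorem alt_eq_winScan (arr : List String) (k : Nat) (hk : 1 ≤ k) :
    utilcheck_alt arr (k : Int) = winScan k arr := by
  unfold utilcheck_alt
  cases arr with
  | nil => rfl
  | cons c s' =>
    rw [show utilcheckAltLoop (k : Int) (c :: s') none 0 =
          (if (1 : Int) = (k : Int) ∧ (c = "X" ∨ c = "O") then (if c = "X" then -1 else 1)
           else utilcheckAltLoop (k : Int) s' (some c) 1) from by
      simp [utilcheckAltLoop]]
    by_cases hret : (1 : Int) = (k : Int) ∧ (c = "X" ∨ c = "O")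
    · rw [if_pos hret]
      obtain ⟨hrk, hXO⟩ := hret
      have hk1 : k = 1 := by omega
      subst hk1
      rw [winScan_cons]
      rw [if_pos (show 1 ≤ (c :: s').length from by simp)]
      simp only [List.take_succ_cons, List.take_zero]
      rcases hXO with rfl | rfl
      · rw [if_pos (show ((["X"] : List String).all (· = "X")) = true from by decide)]
        decide
      · rw [if_neg (show ¬ (((["O"] : List String).all (· = "X")) = true) from by decide),
            if_pos (show ((["O"] : List String).all (· = "O")) = true from by decide)]
        decide
    · rw [if_neg hret]
      rw [show (1 : Int) = ((1 : Nat) : Int) from rfl]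
      rw [altLoop_eq_winScan k hk s' c 1 le_rfl (by
        intro hXO
        have h1 : (1 : Int) ≠ (k : Int) := fun h => hret ⟨h.symm ▸ rfl, hXO⟩
        omega)]
      rfl

-- ===== VERDICT (by name: the statement is the Claim_ definition above) =====
theorem utilcheck_spec : Claim_equal_utilcheck := by
  intro arr winK _ hpre
  obtain ⟨hne, hk⟩ := hpre
  unfold Spec_utilcheck
  have hkn : winK = ((winK.toNat : Nat) : Int) := by omega
  have h1 : 1 ≤ winK.toNat := by omega
  rw [hkn, utilcheck_eq_winScan arr winK.toNat h1, alt_eq_winScan arr winK.toNat h1]
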